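-- pv_equiv track=rewrite | github.com/FredGoor/decodepipe | decodingpipe/pipeline.py | _trna_label_for_codons
-- ===== SOURCE A (Python) =====
-- from typing import Dict, List, Optional, Sequence, Set, Tuple
--
-- def _trna_label_for_codons(codons: List[str], codon_to_trna_set: Dict[str, Set[str]], fallback_label: str) -> str:
--     sets = [set(codon_to_trna_set.get(c, set())) for c in codons]
--     nonempty = [s for s in sets if len(s) > 0]
--     if not nonempty:
--         return fallback_label
--     shared = set.intersection(*nonempty) if len(nonempty) >= 2 else nonempty[0]
--     if shared:
--         return "/".join(sorted(shared))
--     uni = set().union(*nonempty)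
--     return "/".join(sorted(uni)) if uni else fallback_label
-- ===== SOURCE B (Python) =====
-- def _trna_label_for_codons(codons, codon_to_trna_set, fallback_label):
--     counts = {}
--     n_nonempty = 0
--     for c in codons:
--         s = codon_to_trna_set.get(c)
--         if s:
--             n_nonempty += 1
--             for lab in s:
--                 counts[lab] = counts.get(lab, 0) + 1
--     if n_nonempty == 0:
--         return fallback_label
--     shared = [lab for lab, k in counts.items() if k == n_nonempty]
--     if shared:
--         return "/".join(sorted(shared))
--     return "/".join(sorted(counts))
-- ===== Notes on version B (the rewrite author's own statement) =====
-- stated objective: alternative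
-- what changed: Replaces A's build-all-sets + set.intersection/set.union passes with a single fold that tallies, per label, how many nonempty codon sets contain it; shared labels are those whose tally equals the nonempty-set count and the union is the tally's key set.
-- outside the precondition, e.g. on _trna_label_for_codons(['a', 'a'], {'a': ['X', 'X', 'Y']}, 'F'): A returns 'X/Y', B returns 'Y'
import Mathlib
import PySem

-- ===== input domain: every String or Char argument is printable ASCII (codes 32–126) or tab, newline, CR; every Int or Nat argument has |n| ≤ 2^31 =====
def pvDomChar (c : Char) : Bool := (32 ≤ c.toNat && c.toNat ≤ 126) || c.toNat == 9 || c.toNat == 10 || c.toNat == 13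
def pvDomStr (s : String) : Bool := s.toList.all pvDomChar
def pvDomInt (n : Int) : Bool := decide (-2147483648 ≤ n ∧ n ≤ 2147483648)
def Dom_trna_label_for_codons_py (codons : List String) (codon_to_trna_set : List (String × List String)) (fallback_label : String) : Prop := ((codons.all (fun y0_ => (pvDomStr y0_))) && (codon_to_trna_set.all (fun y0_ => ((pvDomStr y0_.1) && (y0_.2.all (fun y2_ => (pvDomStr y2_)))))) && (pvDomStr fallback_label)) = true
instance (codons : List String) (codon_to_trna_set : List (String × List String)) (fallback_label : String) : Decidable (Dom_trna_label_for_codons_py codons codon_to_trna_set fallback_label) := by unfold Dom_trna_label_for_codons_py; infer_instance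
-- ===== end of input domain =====

-- B replaces A's set.intersection/set.union combination by a single pass that tallies, per label,
-- how many nonempty codon sets contain it (shared = labels whose tally equals the number of
-- nonempty sets; union = all tallied labels); same cost, different decomposition ('alternative').

-- ===== PORT A =====
def trna_label_for_codons_py (codons : List String) (codon_to_trna_set : List (String × List String)) (fallback_label : String) : String :=
  let d := PySem.Dict.mk codon_to_trna_set
  let sets := codons.map (fun c => PySem.Set.ofList (d.getD c []))
  let nonempty := sets.filter (fun s => decide (s.length > 0))
  match nonempty with
  | [] => fallback_label
  | s0 :: rest =>
    let shared := if (s0 :: rest).length ≥ 2 then rest.foldl PySem.Set.inter s0 else s0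
    if shared ≠ [] then PySem.Str.join "/" (PySem.List.sorted shared (fun x => x) false)
    else
      let uni := (s0 :: rest).foldl PySem.Set.union PySem.Set.empty
      if uni ≠ [] then PySem.Str.join "/" (PySem.List.sorted uni (fun x => x) false)
      else fallback_label

-- ===== PORT B =====
def trna_label_for_codons_py_alt (codons : List String) (codon_to_trna_set : List (String × List String)) (fallback_label : String) : String :=
  let d := PySem.Dict.mk codon_to_trna_set
  let st := codons.foldl (fun (p : Int × PySem.Dict String Int) c =>
      let s := d.getD c []
      if s.isEmpty then p
      else (p.1 + 1, s.foldl (fun cnt lab => cnt.modify lab 0 (· + 1)) p.2))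
    (0, PySem.Dict.empty)
  if st.1 = 0 then fallback_label
  else
    let shared := (st.2.items.filter (fun kv => kv.2 == st.1)).map Prod.fst
    if shared ≠ [] then PySem.Str.join "/" (PySem.List.sorted shared (fun x => x) false)
    else PySem.Str.join "/" (PySem.List.sorted st.2.keys (fun x => x) false)

-- ===== PRECONDITION & SPEC =====
-- Pre_ excludes association lists in which some value list contains a duplicate: such a list does
-- not represent any Python set (the parameter's values have type Set[str]), so no Python input
-- corresponds to it.
def Pre_trna_label_for_codons_py (codons : List String) (codon_to_trna_set : List (String × List String)) (fallback_label : String) : Prop :=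
  ∀ p ∈ codon_to_trna_set, p.2.Nodup
instance (codons : List String) (codon_to_trna_set : List (String × List String)) (fallback_label : String) : Decidable (Pre_trna_label_for_codons_py codons codon_to_trna_set fallback_label) := by unfold Pre_trna_label_for_codons_py; infer_instance

def pvWitness_trna_label_for_codons_py : List String × (List (String × List String)) × String :=
  (["a"], [("a", ["X"])], "F")

def Spec_trna_label_for_codons_py (codons : List String) (codon_to_trna_set : List (String × List String)) (fallback_label : String) (out : String) : Prop := out = trna_label_for_codons_py_alt codons codon_to_trna_set fallback_label
instance (codons : List String) (codon_to_trna_set : List (String × List String)) (fallback_label : String) (out : String) : Decidable (Spec_trna_label_for_codons_py codons codon_to_trna_set fallback_label out) := by unfold Spec_trna_label_for_codons_py; infer_instance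

-- ===== CLAIM (what is proved, stated in full; the proofs are below) =====
def Claim_equal_trna_label_for_codons_py : Prop := ∀ (codons : List String) (codon_to_trna_set : List (String × List String)) (fallback_label : String), Dom_trna_label_for_codons_py codons codon_to_trna_set fallback_label → Pre_trna_label_for_codons_py codons codon_to_trna_set fallback_label → Spec_trna_label_for_codons_py codons codon_to_trna_set fallback_label (trna_label_for_codons_py codons codon_to_trna_set fallback_label)

-- ===== LEMMAS AND PROOFS =====

-- the dict lookup always returns a duplicate-free list under Pre_
theorem pv_getD_nodup (m : List (String × List String)) (h : ∀ p ∈ m, p.2.Nodup) (c : String) :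
    ((PySem.Dict.mk m).getD c []).Nodup := by
  induction m with
  | nil => simp [PySem.Dict.getD, PySem.Dict.get?]
  | cons p rest ih =>
    obtain ⟨k, v⟩ := p
    simp only [PySem.Dict.getD, PySem.Dict.get?_mk_cons]
    split
    · simpa using h (k, v) (by simp)
    · exact ih (fun q hq => h q (List.mem_cons_of_mem _ hq)) 

-- B's fold computes (number of nonempty sets, counter of their concatenation)
theorem pv_foldB (d : PySem.Dict String (List String)) (codons : List String) (n0 : Int) (ys : List String) :
    codons.foldl (fun (p : Int × PySem.Dict String Int) c =>
      let s := d.getD c []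
      if s.isEmpty then p
      else (p.1 + 1, s.foldl (fun (cnt : PySem.Dict String Int) lab => cnt.modify lab 0 (· + 1)) p.2))
      (n0, PySem.Dict.counter ys)
    = (n0 + (((codons.map (fun c => d.getD c [])).filter (fun s => !s.isEmpty)).length : Int),
       PySem.Dict.counter (ys ++ ((codons.map (fun c => d.getD c [])).filter (fun s => !s.isEmpty)).flatten)) := by
  induction codons generalizing n0 ys with
  | nil => simp
  | cons c cs ih =>
    by_cases hs : (d.getD c []).isEmpty
    · simp only [List.isEmpty_iff] at hs
      simpa [hs] using ih n0 ys
    · have hcount : (d.getD c []).foldl (fun (cnt : PySem.Dict String Int) lab => cnt.modify lab 0 (· + 1)) (PySem.Dict.counter ys)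
          = PySem.Dict.counter (ys ++ d.getD c []) := by
        rw [PySem.Dict.counter_eq_foldl, PySem.Dict.counter_eq_foldl, List.foldl_append]
      have hb : (!(d.getD c []).isEmpty) = true := by simpa using hs
      simp only [List.foldl_cons, List.map_cons, List.filter_cons]
      rw [if_neg hs, if_pos hb, hcount, ih (n0 + 1) (ys ++ d.getD c [])]
      simp [List.append_assoc]
      omega

theorem pv_mem_foldl_inter (t : List (PySem.Set String)) (h : PySem.Set String) (x : String) :
    x ∈ t.foldl PySem.Set.inter h ↔ x ∈ h ∧ ∀ s ∈ t, x ∈ s := by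
  induction t generalizing h with
  | nil => simp
  | cons a t ih =>
    simp only [List.foldl_cons, ih, PySem.Set.mem_inter, List.mem_cons]
    constructor
    · rintro ⟨⟨h1, h2⟩, h3⟩; exact ⟨h1, fun s hs => by rcases hs with rfl | hs; exact h2; exact h3 s hs⟩
    · rintro ⟨h1, h2⟩; exact ⟨⟨h1, h2 a (Or.inl rfl)⟩, fun s hs => h2 s (Or.inr hs)⟩

theorem pv_nodup_foldl_inter (t : List (PySem.Set String)) (h : PySem.Set String) (hn : h.Nodup) :
    (t.foldl PySem.Set.inter h).Nodup := by
  induction t generalizing h with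
  | nil => exact hn
  | cons a t ih => exact ih _ (PySem.Set.nodup_inter h a hn)

theorem pv_mem_foldl_union (t : List (PySem.Set String)) (acc : PySem.Set String) (x : String) :
    x ∈ t.foldl PySem.Set.union acc ↔ x ∈ acc ∨ ∃ s ∈ t, x ∈ s := by
  induction t generalizing acc with
  | nil => simp
  | cons a t ih =>
    simp only [List.foldl_cons, ih, PySem.Set.mem_union, List.mem_cons]
    constructor
    · rintro (⟨h1 | h1⟩ | ⟨s, hs, hx⟩)
      · exact Or.inl h1
      · exact Or.inr ⟨a, Or.inl rfl, h1⟩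
      · exact Or.inr ⟨s, Or.inr hs, hx⟩
    · rintro (h1 | ⟨s, rfl | hs, hx⟩)
      · exact Or.inl (Or.inl h1)
      · exact Or.inl (Or.inr hx)
      · exact Or.inr ⟨s, hs, hx⟩

theorem pv_nodup_foldl_union (t : List (PySem.Set String)) (acc : PySem.Set String) (hn : acc.Nodup) :
    (t.foldl PySem.Set.union acc).Nodup := by
  induction t generalizing acc with
  | nil => exact hn
  | cons a t ih => exact ih _ (PySem.Set.nodup_union acc a hn)

theorem pv_count_flatten (L : List (List String)) (h : ∀ s ∈ L, s.Nodup) (x : String) :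
    L.flatten.count x = (L.filter (fun s => decide (x ∈ s))).length := by
  induction L with
  | nil => simp
  | cons s L ih =>
    have hs : s.Nodup := h s (by simp)
    have ihL := ih (fun q hq => h q (List.mem_cons_of_mem _ hq))
    simp only [List.flatten_cons, List.count_append, List.filter_cons]
    by_cases hx : x ∈ s
    · have : s.count x = 1 := List.count_eq_one_of_mem hs hx
      simp [hx, this, ihL]
      omega
    · have : s.count x = 0 := List.count_eq_zero.mpr hx
      simp [hx, this, ihL]

-- proof-side continuations: each port is (by rfl) its continuation applied to its first pass
def pvContA (fallback_label : String) : List (PySem.Set String) → String :=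
  fun nonempty => match nonempty with
  | [] => fallback_label
  | s0 :: rest =>
    let shared := if (s0 :: rest).length ≥ 2 then rest.foldl PySem.Set.inter s0 else s0
    if shared ≠ [] then PySem.Str.join "/" (PySem.List.sorted shared (fun x => x) false)
    else
      let uni := (s0 :: rest).foldl PySem.Set.union PySem.Set.empty
      if uni ≠ [] then PySem.Str.join "/" (PySem.List.sorted uni (fun x => x) false)
      else fallback_label

def pvContB (fallback_label : String) : (Int × PySem.Dict String Int) → String :=
  fun st =>
    if st.1 = 0 then fallback_label
    else
      let shared := (st.2.items.filter (fun kv => kv.2 == st.1)).map Prod.fst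
      if shared ≠ [] then PySem.Str.join "/" (PySem.List.sorted shared (fun x => x) false)
      else PySem.Str.join "/" (PySem.List.sorted st.2.keys (fun x => x) false)

theorem pv_map_fst_filter (K : List String) (f : String → Int) (nn : Int) :
    ((K.map (fun k => (k, f k))).filter (fun kv => kv.2 == nn)).map Prod.fst
    = K.filter (fun k => f k == nn) := by
  induction K with
  | nil => rfl
  | cons k K ih => by_cases h : f k == nn <;> simp_all

-- ===== VERDICT (by name: the statement is the Claim_ definition above) =====
theorem trna_label_for_codons_py_spec : Claim_equal_trna_label_for_codons_py := by
  intro codons m fb _dom hpre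
  unfold Spec_trna_label_for_codons_py
  have hnod : ∀ c, ((PySem.Dict.mk m).getD c []).Nodup := pv_getD_nodup m hpre
  have hsets : codons.map (fun c => PySem.Set.ofList ((PySem.Dict.mk m).getD c []))
      = codons.map (fun c => (PySem.Dict.mk m).getD c []) :=
    List.map_congr_left (fun c _ => PySem.Set.ofList_eq_self_of_nodup _ (hnod c))
  have hfilter : (codons.map (fun c => (PySem.Dict.mk m).getD c [])).filter (fun s => decide (s.length > 0))
      = (codons.map (fun c => (PySem.Dict.mk m).getD c [])).filter (fun s => !s.isEmpty) :=
    List.filter_congr (fun s _ => by cases s <;> simp)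
  have hA : trna_label_for_codons_py codons m fb
      = pvContA fb ((codons.map (fun c => PySem.Set.ofList ((PySem.Dict.mk m).getD c []))).filter
          (fun s => decide (s.length > 0))) := rfl
  have hB0 : trna_label_for_codons_py_alt codons m fb
      = pvContB fb (codons.foldl (fun (p : Int × PySem.Dict String Int) c =>
          let s := (PySem.Dict.mk m).getD c []
          if s.isEmpty then p
          else (p.1 + 1, s.foldl (fun cnt lab => cnt.modify lab 0 (· + 1)) p.2))
          (0, PySem.Dict.counter [])) := rfl
  have hBfold := pv_foldB (PySem.Dict.mk m) codons 0 []
  simp only [zero_add, List.nil_append] at hBfold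
  rw [hA, hB0, hsets, hfilter, hBfold]
  generalize hne : (codons.map (fun c => (PySem.Dict.mk m).getD c [])).filter (fun s => !s.isEmpty) = ne
  have hmem_ne : ∀ s ∈ ne, s.Nodup := by
    intro s hs
    rw [← hne] at hs
    obtain ⟨hs', -⟩ := List.mem_filter.mp hs
    obtain ⟨c, -, rfl⟩ := List.mem_map.mp hs'
    exact hnod c
  have hne_nonnil : ∀ s ∈ ne, s ≠ [] := by
    intro s hs
    rw [← hne] at hs
    have := (List.mem_filter.mp hs).2
    simpa [List.isEmpty_iff] using this
  clear hne hBfold hA hB0 hfilter hsets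
  match ne, hmem_ne, hne_nonnil with
  | [], _, _ => rfl
  | s0 :: rest, hmem_ne, hne_nonnil =>
  unfold pvContA pvContB
  simp only []
  have hlen0 : ¬ ((((s0 :: rest).length : Nat) : Int) = 0) := by
    simp only [List.length_cons]
    omega
  rw [if_neg hlen0]
  have hsA : (if (s0 :: rest).length ≥ 2 then rest.foldl PySem.Set.inter s0 else s0)
      = rest.foldl PySem.Set.inter s0 := by
    cases rest with
    | nil => simp
    | cons a t => simp
  rw [hsA]
  have hcnt := pv_count_flatten (s0 :: rest) hmem_ne
  have hsB : (((PySem.Dict.counter (s0 :: rest).flatten).items.filter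
        (fun kv => kv.2 == (((s0 :: rest).length : Nat) : Int))).map Prod.fst)
      = (PySem.Set.ofList (s0 :: rest).flatten).filter
          (fun k => ((List.count k (s0 :: rest).flatten : Int) == (((s0 :: rest).length : Nat) : Int))) := by
    rw [PySem.Dict.items_counter, pv_map_fst_filter]
  have hkey : ∀ x, (x ∈ (s0 :: rest).flatten ∧ ((List.count x (s0 :: rest).flatten : Nat) : Int) = (((s0 :: rest).length : Nat) : Int))
      ↔ (x ∈ s0 ∧ ∀ s ∈ rest, x ∈ s) := by
    intro x
    rw [show List.count x (s0 :: rest).flatten = (s0 :: rest).flatten.count x from rfl, hcnt x]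
    constructor
    · rintro ⟨hx, hc⟩
      have hl : (List.filter (fun s => decide (x ∈ s)) (s0 :: rest)).length = (s0 :: rest).length := by
        exact_mod_cast hc
      have hall := List.length_filter_eq_length_iff.mp hl
      exact ⟨by simpa using hall s0 (by simp), fun s hs => by simpa using hall s (by simp [hs])⟩
    · rintro ⟨h0, hr⟩
      have hall : ∀ s ∈ s0 :: rest, (decide (x ∈ s)) = true := by
        intro s hs
        rcases List.mem_cons.mp hs with rfl | hs
        · simpa using h0
        · simpa using hr s hs
      have hl := List.length_filter_eq_length_iff.mpr hall
      constructor
      · exact List.mem_flatten.mpr ⟨s0, by simp, h0⟩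
      · exact_mod_cast hl
  have hmemB : ∀ x, x ∈ (((PySem.Dict.counter (s0 :: rest).flatten).items.filter
        (fun kv => kv.2 == (((s0 :: rest).length : Nat) : Int))).map Prod.fst)
      ↔ (x ∈ s0 ∧ ∀ s ∈ rest, x ∈ s) := by
    intro x
    rw [hsB]
    simp only [List.mem_filter, PySem.Set.mem_ofList, beq_iff_eq]
    exact hkey x
  have hmemA : ∀ x, x ∈ rest.foldl PySem.Set.inter s0 ↔ (x ∈ s0 ∧ ∀ s ∈ rest, x ∈ s) :=
    pv_mem_foldl_inter rest s0
  have hnodA : (rest.foldl PySem.Set.inter s0).Nodup :=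
    pv_nodup_foldl_inter rest s0 (hmem_ne s0 (by simp))
  have hnodB : ((((PySem.Dict.counter (s0 :: rest).flatten).items.filter
        (fun kv => kv.2 == (((s0 :: rest).length : Nat) : Int))).map Prod.fst)).Nodup := by
    rw [hsB]
    exact (PySem.Set.nodup_ofList _).filter _
  have hperm : (((PySem.Dict.counter (s0 :: rest).flatten).items.filter
        (fun kv => kv.2 == (((s0 :: rest).length : Nat) : Int))).map Prod.fst).Perm
        (rest.foldl PySem.Set.inter s0) :=
    (List.perm_ext_iff_of_nodup hnodB hnodA).mpr (fun x => by rw [hmemA, hmemB])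
  have hiff : (rest.foldl PySem.Set.inter s0 = []) ↔ ((((PySem.Dict.counter (s0 :: rest).flatten).items.filter
        (fun kv => kv.2 == (((s0 :: rest).length : Nat) : Int))).map Prod.fst) = []) := by
    constructor
    · intro h
      have h' := hperm
      rw [h] at h'
      exact h'.eq_nil
    · intro h
      have h' := hperm.symm
      rw [h] at h'
      exact h'.eq_nil
  obtain ⟨x0, hx0⟩ := List.exists_mem_of_ne_nil s0 (hne_nonnil s0 (by simp))
  have hxuni : x0 ∈ (s0 :: rest).foldl PySem.Set.union PySem.Set.empty :=
    (pv_mem_foldl_union _ _ _).mpr (Or.inr ⟨s0, by simp, hx0⟩)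
  have hjoin : PySem.Str.join "/" (PySem.List.sorted (rest.foldl PySem.Set.inter s0) (fun x => x) false)
      = PySem.Str.join "/" (PySem.List.sorted (((PySem.Dict.counter (s0 :: rest).flatten).items.filter
          (fun kv => kv.2 == (((s0 :: rest).length : Nat) : Int))).map Prod.fst) (fun x => x) false) :=
    congrArg _ ((PySem.List.sorted_id_eq_sorted_id_iff_perm _ _).mpr hperm.symm)
  have hpermU : ((s0 :: rest).foldl PySem.Set.union PySem.Set.empty).Perm
      ((PySem.Dict.counter (s0 :: rest).flatten).keys) := by
    rw [PySem.Dict.keys_counter]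
    have hnodU : ((s0 :: rest).foldl PySem.Set.union PySem.Set.empty).Nodup :=
      pv_nodup_foldl_union _ _ List.nodup_nil
    refine (List.perm_ext_iff_of_nodup hnodU (PySem.Set.nodup_ofList _)).mpr (fun x => ?_)
    rw [pv_mem_foldl_union, PySem.Set.mem_ofList, List.mem_flatten]
    constructor
    · rintro (h | ⟨t, ht, hxt⟩)
      · cases h
      · exact ⟨t, ht, hxt⟩
    · rintro ⟨t, ht, hxt⟩
      exact Or.inr ⟨t, ht, hxt⟩
  have hjoinU : PySem.Str.join "/" (PySem.List.sorted ((s0 :: rest).foldl PySem.Set.union PySem.Set.empty) (fun x => x) false)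
      = PySem.Str.join "/" (PySem.List.sorted ((PySem.Dict.counter (s0 :: rest).flatten).keys) (fun x => x) false) :=
    congrArg _ ((PySem.List.sorted_id_eq_sorted_id_iff_perm _ _).mpr hpermU)
  have hUne : (s0 :: rest).foldl PySem.Set.union PySem.Set.empty ≠ [] :=
    List.ne_nil_of_mem hxuni
  split_ifs with h1 h2 h3
  · exact hjoin
  · exact absurd (hiff.mpr (not_not.mp h2)) h1
  · exact absurd (hiff.mp (not_not.mp h1)) h3
  · exact hjoinU
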